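-- pv_equiv track=rewrite | github.com/MKHan91/VQ-Font | CR_mapping.py | searchComponents
-- ===== SOURCE A (Python) =====
-- from collections import deque
--
-- def searchComponents(xi, T, max_depth):
--     """
--     xi: content character
--     T: single-level decomposition table, dict {char: [components]}
--     max_depth: 최대 탐색 깊이
--     """
--     queue = deque([(xi, 0)])
--     visited = set()
--     components = set()
--
--     while queue:
--         node, depth = queue.popleft()
--         if node in visited or depth > max_depth:
--             continue
--         visited.add(node)
--
--         if node in T:
--             comps = T[node]
--             components.update(comps)
--             for c in comps:
--                 queue.append((c, depth + 1))
--
--     return components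
-- ===== SOURCE B (Python) =====
-- def searchComponents(xi, T, max_depth):
--     """Level-synchronized BFS: one whole depth level per iteration."""
--     frontier = [xi]
--     visited = set()
--     components = set()
--     depth = 0
--     while depth <= max_depth and frontier:
--         next_frontier = []
--         for node in frontier:
--             if node not in visited:
--                 visited.add(node)
--                 if node in T:
--                     comps = T[node]
--                     components.update(comps)
--                     next_frontier.extend(comps)
--         frontier = next_frontier
--         depth += 1
--     return components
-- ===== Notes on version B (the rewrite author's own statement) =====
-- stated objective: alternative
-- what changed: Replaced the tuple-queue BFS (deque of (node, depth) pairs popped one at a time) with a level-synchronized BFS that processes one whole depth level per iteration, keeping no per-node depth and stopping as soon as the frontier is empty or the depth bound is passed.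
import Mathlib
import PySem

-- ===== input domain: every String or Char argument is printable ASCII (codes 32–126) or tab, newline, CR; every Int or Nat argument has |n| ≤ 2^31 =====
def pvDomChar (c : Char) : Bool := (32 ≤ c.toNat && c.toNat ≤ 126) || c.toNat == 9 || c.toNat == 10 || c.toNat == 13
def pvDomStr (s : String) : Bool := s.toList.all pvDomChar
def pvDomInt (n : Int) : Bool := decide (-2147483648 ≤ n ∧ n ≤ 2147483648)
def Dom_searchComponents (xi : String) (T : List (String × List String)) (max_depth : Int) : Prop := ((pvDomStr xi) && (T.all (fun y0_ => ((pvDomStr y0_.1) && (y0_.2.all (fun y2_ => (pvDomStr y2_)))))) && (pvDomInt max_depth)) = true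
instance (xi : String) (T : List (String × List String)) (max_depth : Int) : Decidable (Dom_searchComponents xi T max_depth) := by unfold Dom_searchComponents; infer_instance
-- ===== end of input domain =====

-- B replaces A's tuple-queue BFS by a level-synchronized BFS (one whole depth
-- level per iteration, no per-node depth tags); same return value, similar cost.

-- ===== PORT A =====

-- dict lookup on the association list: first match, as Python 'T[node]' / 'node in T'
def tGet? (T : List (String × List String)) (k : String) : Option (List String) :=
  (T.find? (fun p => p.1 == k)).map (·.2)

-- the while loop of A: FIFO queue of (node, depth) pairs. The Nat argument is a
-- fuel guard that only makes the recursion structural: searchComponents calls it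
-- with fuel 1 + totLen T, which exceeds the number of pops A ever performs
-- (theorem loopA_fuel / phi below), so the fuel-exhaustion branch is unreachable there.
def loopA (T : List (String × List String)) (max_depth : Int) :
    Nat → List (String × Int) → PySem.Set String → PySem.Set String → List String
  | _, [], _, components => components
  | 0, _ :: _, _, components => components
  | fuel + 1, (node, depth) :: rest, visited, components =>
    if PySem.Set.contains visited node || decide (depth > max_depth) then
      loopA T max_depth fuel rest visited components
    else
      match tGet? T node with
      | some comps =>
          loopA T max_depth fuel (rest ++ comps.map (fun c => (c, depth + 1)))
            (PySem.Set.add visited node) (PySem.Set.update components comps)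
      | none => loopA T max_depth fuel rest (PySem.Set.add visited node) components

-- total length of all component lists of T (fuel bound for loopA)
def totLen (T : List (String × List String)) : Nat := (T.map (fun p => p.2.length)).sum

def searchComponents (xi : String) (T : List (String × List String)) (max_depth : Int) : List String :=
  loopA T max_depth (1 + totLen T) [(xi, 0)] PySem.Set.empty PySem.Set.empty

-- ===== PORT B =====

-- the body of B's 'for node in frontier' loop; state = (visited, components, next_frontier)
def stepB (T : List (String × List String))
    (st : PySem.Set String × PySem.Set String × List String) (node : String) :
    PySem.Set String × PySem.Set String × List String :=
  if PySem.Set.contains st.1 node then st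
  else
    match tGet? T node with
    | some comps =>
        (PySem.Set.add st.1 node, PySem.Set.update st.2.1 comps, st.2.2 ++ comps)
    | none => (PySem.Set.add st.1 node, st.2.1, st.2.2)

-- the while loop of B, one whole level per iteration; the Nat argument counts the
-- remaining levels (max_depth + 1 - depth), so 'n = 0' is exactly B's 'depth > max_depth'
def loopB (T : List (String × List String)) :
    Nat → List String → PySem.Set String → PySem.Set String → List String
  | _, [], _, components => components
  | 0, _ :: _, _, components => components
  | n + 1, frontier, visited, components =>
    let st := frontier.foldl (stepB T) (visited, components, [])
    loopB T n st.2.2 st.1 st.2.1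

def searchComponents_alt (xi : String) (T : List (String × List String)) (max_depth : Int) : List String :=
  loopB T (max_depth + 1).toNat [xi] PySem.Set.empty PySem.Set.empty

-- ===== PRECONDITION & SPEC =====
def Spec_searchComponents (xi : String) (T : List (String × List String)) (max_depth : Int) (out : List String) : Prop := out = searchComponents_alt xi T max_depth
instance (xi : String) (T : List (String × List String)) (max_depth : Int) (out : List String) : Decidable (Spec_searchComponents xi T max_depth out) := by unfold Spec_searchComponents; infer_instance

-- ===== CLAIM (what is proved, stated in full; the proofs are below) =====
def Claim_equal_searchComponents : Prop := ∀ (xi : String) (T : List (String × List String)) (max_depth : Int), Dom_searchComponents xi T max_depth → Spec_searchComponents xi T max_depth (searchComponents xi T max_depth)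

-- ===== LEMMAS AND PROOFS =====

-- total length of the component lists of the T-entries not yet visited
def unvisitedLen (T : List (String × List String)) (v : PySem.Set String) : Nat :=
  ((T.filter (fun p => !(PySem.Set.contains v p.1))).map (fun p => p.2.length)).sum

-- potential of a loopA state: an upper bound on the pops still to come
def phi (T : List (String × List String)) (q : List (String × Int)) (v : PySem.Set String) : Nat :=
  q.length + unvisitedLen T v

theorem phi_pos (T : List (String × List String)) (p : String × Int)
    (rest : List (String × Int)) (v : PySem.Set String) : 1 ≤ phi T (p :: rest) v := by
  unfold phi
  simp [List.length_cons]
  omega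

theorem contains_add (v : PySem.Set String) (n x : String) :
    PySem.Set.contains (PySem.Set.add v n) x = (PySem.Set.contains v x || x == n) := by
  by_cases h : x ∈ PySem.Set.add v n
  · rw [(PySem.Set.contains_iff _ _).mpr h]
    rcases (PySem.Set.mem_add v n x).mp h with h' | h'
    · rw [(PySem.Set.contains_iff _ _).mpr h']
      simp
    · simp [h']
  · have h1 : PySem.Set.contains (PySem.Set.add v n) x = false := by
      rw [← Bool.not_eq_true, PySem.Set.contains_iff]; exact h
    have h2 : x ∉ v := fun hx => h ((PySem.Set.mem_add v n x).mpr (Or.inl hx))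
    have h3 : x ≠ n := fun hx => h ((PySem.Set.mem_add v n x).mpr (Or.inr hx))
    have h4 : PySem.Set.contains v x = false := by
      rw [← Bool.not_eq_true, PySem.Set.contains_iff]; exact h2
    rw [h1, h4]
    simp [h3]

theorem unvisitedLen_cons (p : String × List String) (T : List (String × List String))
    (v : PySem.Set String) :
    unvisitedLen (p :: T) v
      = (if PySem.Set.contains v p.1 then 0 else p.2.length) + unvisitedLen T v := by
  unfold unvisitedLen
  rw [List.filter_cons]
  cases h : PySem.Set.contains v p.1 <;> simp

theorem unvisitedLen_add_le (T : List (String × List String)) (v : PySem.Set String)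
    (n : String) : unvisitedLen T (PySem.Set.add v n) ≤ unvisitedLen T v := by
  induction T with
  | nil => simp [unvisitedLen]
  | cons p T ih =>
      rw [unvisitedLen_cons, unvisitedLen_cons]
      have : (if PySem.Set.contains (PySem.Set.add v n) p.1 then 0 else p.2.length)
          ≤ (if PySem.Set.contains v p.1 then 0 else p.2.length) := by
        rw [contains_add]
        cases h : PySem.Set.contains v p.1
        · simp only [Bool.false_or]
          split <;> simp
        · simp
      omega

theorem unvisitedLen_visit (T : List (String × List String)) (v : PySem.Set String)
    (n : String) (comps : List String)
    (hnv : PySem.Set.contains v n = false) (hg : tGet? T n = some comps) :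
    comps.length + unvisitedLen T (PySem.Set.add v n) ≤ unvisitedLen T v := by
  induction T with
  | nil => simp [tGet?] at hg
  | cons p T ih =>
      rw [unvisitedLen_cons, unvisitedLen_cons]
      by_cases hp : p.1 = n
      · have hcomps : comps = p.2 := by
          unfold tGet? at hg
          rw [List.find?_cons_of_pos (by simp [hp])] at hg
          simp at hg
          exact hg.symm
        subst hcomps
        have h1 : PySem.Set.contains v p.1 = false := by rw [hp]; exact hnv
        have h2 : PySem.Set.contains (PySem.Set.add v n) p.1 = true := by
          rw [contains_add, hp]; simp
        rw [h1, h2]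
        have := unvisitedLen_add_le T v n
        simp
        omega
      · have hhead : PySem.Set.contains (PySem.Set.add v n) p.1 = PySem.Set.contains v p.1 := by
          rw [contains_add]
          simp [hp]
        have htail : tGet? T n = some comps := by
          unfold tGet? at hg ⊢
          rw [List.find?_cons_of_neg (by simp [hp])] at hg
          exact hg
        have := ih htail
        rw [hhead]
        omega

-- each pop of loopA strictly decreases phi: skip / miss case
theorem phi_step_skip (T : List (String × List String)) (n : String) (d : Int)
    (rest : List (String × Int)) (v : PySem.Set String) :
    phi T rest v + 1 ≤ phi T ((n, d) :: rest) v := by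
  unfold phi; simp

-- each pop of loopA strictly decreases phi: visit with node ∉ T
theorem phi_step_none (T : List (String × List String)) (n : String) (d : Int)
    (rest : List (String × Int)) (v : PySem.Set String) :
    phi T rest (PySem.Set.add v n) + 1 ≤ phi T ((n, d) :: rest) v := by
  unfold phi
  have := unvisitedLen_add_le T v n
  simp
  omega

-- each pop of loopA strictly decreases phi: visit with node ∈ T (children enqueued)
theorem phi_step_some (T : List (String × List String)) (n : String) (d : Int)
    (rest : List (String × Int)) (v : PySem.Set String) (comps : List String)
    (hnv : PySem.Set.contains v n = false) (hg : tGet? T n = some comps) :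
    phi T (rest ++ comps.map (fun c => (c, d + 1))) (PySem.Set.add v n) + 1
      ≤ phi T ((n, d) :: rest) v := by
  unfold phi
  have := unvisitedLen_visit T v n comps hnv hg
  simp
  omega

-- with enough fuel the fuel amount is irrelevant (A's loop pops at most phi times)
theorem loopA_fuel (T : List (String × List String)) (max_depth : Int) :
    ∀ (f1 f2 : Nat) (q : List (String × Int)) (v c : PySem.Set String),
      phi T q v ≤ f1 → phi T q v ≤ f2 →
      loopA T max_depth f1 q v c = loopA T max_depth f2 q v c := by
  intro f1
  induction f1 with
  | zero =>
      intro f2 q v c h1 _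
      cases q with
      | nil => simp [loopA]
      | cons p rest => exact absurd h1 (by have := phi_pos T p rest v; omega)
  | succ g1 ih =>
      intro f2 q v c h1 h2
      cases q with
      | nil => simp [loopA]
      | cons p rest =>
          obtain ⟨n, d⟩ := p
          cases f2 with
          | zero => exact absurd h2 (by have := phi_pos T (n, d) rest v; omega)
          | succ g2 =>
              rw [loopA, loopA]
              by_cases hc : (PySem.Set.contains v n || decide (d > max_depth)) = true
              · rw [if_pos hc, if_pos hc]
                have := phi_step_skip T n d rest v
                exact ih g2 rest v c (by omega) (by omega)
              · rw [if_neg hc, if_neg hc]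
                have hnv : PySem.Set.contains v n = false := by
                  simp only [Bool.or_eq_true] at hc
                  exact Bool.eq_false_iff.mpr (fun h => hc (Or.inl h))
                cases hg : tGet? T n with
                | some comps =>
                    have := phi_step_some T n d rest v comps hnv hg
                    exact ih g2 _ _ _ (by omega) (by omega)
                | none =>
                    have := phi_step_none T n d rest v
                    exact ih g2 _ _ _ (by omega) (by omega)

-- the next_frontier accumulator of stepB only ever grows by appending
theorem foldl_stepB_acc (T : List (String × List String)) :
    ∀ (front : List String) (v c : PySem.Set String) (acc : List String),
      front.foldl (stepB T) (v, c, acc)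
        = ((front.foldl (stepB T) (v, c, [])).1,
           (front.foldl (stepB T) (v, c, [])).2.1,
           acc ++ (front.foldl (stepB T) (v, c, [])).2.2) := by
  intro front
  induction front with
  | nil => intro v c acc; simp
  | cons n front ih =>
      intro v c acc
      simp only [List.foldl_cons]
      by_cases hv : PySem.Set.contains v n
      · simp only [stepB, hv, if_pos]
        exact ih v c acc
      · cases hg : tGet? T n with
        | some comps =>
            simp only [stepB, hv, if_neg, Bool.false_eq_true, not_false_iff, hg,
              List.nil_append]
            rw [ih _ _ (acc ++ comps), ih _ _ comps]
            simp
        | none =>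
            simp only [stepB, hv, if_neg, Bool.false_eq_true, not_false_iff, hg]
            exact ih _ _ acc

-- when every queued depth exceeds max_depth, A's loop drains the queue and returns components
theorem loopA_skip_all (T : List (String × List String)) (max_depth : Int) :
    ∀ (q : List (String × Int)) (f : Nat) (v c : PySem.Set String),
      (∀ p ∈ q, max_depth < p.2) → phi T q v ≤ f →
      loopA T max_depth f q v c = c := by
  intro q
  induction q with
  | nil => intro f v c _ _; simp [loopA]
  | cons p rest ih =>
      intro f v c hq hf
      obtain ⟨n, d⟩ := p
      have hd : max_depth < d := hq (n, d) (List.mem_cons_self)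
      cases f with
      | zero => exact absurd hf (by have := phi_pos T (n, d) rest v; omega)
      | succ g =>
          rw [loopA]
          rw [if_pos (by simp only [Bool.or_eq_true, decide_eq_true_eq]; right; omega)]
          have := phi_step_skip T n d rest v
          exact ih g v c (fun p hp => hq p (List.mem_cons_of_mem _ hp)) (by omega)

-- one level of A's queue processing equals B's fold over the frontier
theorem loopA_level (T : List (String × List String)) (max_depth : Int) (d : Int)
    (hd : d ≤ max_depth) :
    ∀ (front pend : List String) (v c : PySem.Set String) (f1 f2 : Nat),
      phi T (front.map (fun s => (s, d)) ++ pend.map (fun s => (s, d + 1))) v ≤ f1 →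
      phi T ((pend ++ (front.foldl (stepB T) (v, c, [])).2.2).map (fun s => (s, d + 1)))
          (front.foldl (stepB T) (v, c, [])).1 ≤ f2 →
      loopA T max_depth f1 (front.map (fun s => (s, d)) ++ pend.map (fun s => (s, d + 1))) v c
        = loopA T max_depth f2
            ((pend ++ (front.foldl (stepB T) (v, c, [])).2.2).map (fun s => (s, d + 1)))
            (front.foldl (stepB T) (v, c, [])).1
            (front.foldl (stepB T) (v, c, [])).2.1 := by
  intro front
  induction front with
  | nil =>
      intro pend v c f1 f2 h1 h2
      simp only [List.map_nil, List.nil_append, List.foldl_nil, List.append_nil] at h1 h2 ⊢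
      exact loopA_fuel T max_depth f1 f2 _ v c h1 h2
  | cons n front ih =>
      intro pend v c f1 f2 h1 h2
      simp only [List.map_cons, List.cons_append, List.foldl_cons] at h1 h2 ⊢
      cases f1 with
      | zero =>
          exact absurd h1 (by
            have := phi_pos T (n, d)
              (front.map (fun s => (s, d)) ++ pend.map (fun s => (s, d + 1))) v
            omega)
      | succ g1 =>
          rw [loopA]
          by_cases hv : PySem.Set.contains v n
          · rw [if_pos (by simp only [Bool.or_eq_true]; exact Or.inl hv)]
            simp only [stepB, hv, if_pos] at h2 ⊢
            have hstep := phi_step_skip T n d (front.map (fun s => (s, d)) ++ pend.map (fun s => (s, d + 1))) v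
            exact ih pend v c g1 f2 (by omega) h2
          · rw [if_neg (by
              simp only [Bool.or_eq_true, decide_eq_true_eq, not_or, not_lt]
              exact ⟨by simpa using hv, hd⟩)]
            have hnv : PySem.Set.contains v n = false := by simpa using hv
            cases hg : tGet? T n with
            | some comps =>
                simp only [stepB, hv, if_neg, Bool.false_eq_true, not_false_iff, hg,
                  List.nil_append] at h2 ⊢
                rw [foldl_stepB_acc T front (PySem.Set.add v n) (PySem.Set.update c comps) comps] at h2 ⊢
                have hstep := phi_step_some T n d
                  (front.map (fun s => (s, d)) ++ pend.map (fun s => (s, d + 1))) v comps hnv hg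
                simp only [List.map_append, List.append_assoc] at hstep h1 h2 ⊢
                have hIH := ih (pend ++ comps) (PySem.Set.add v n) (PySem.Set.update c comps) g1 f2
                  (by simp only [List.map_append]; omega)
                  (by simpa only [List.map_append, List.append_assoc] using h2)
                simpa only [List.map_append, List.append_assoc] using hIH
            | none =>
                simp only [stepB, hv, if_neg, Bool.false_eq_true, not_false_iff, hg] at h2 ⊢
                have hstep := phi_step_none T n d (front.map (fun s => (s, d)) ++ pend.map (fun s => (s, d + 1))) v
                exact ih pend (PySem.Set.add v n) c g1 f2 (by omega) h2

-- A's loop on a uniform-depth queue equals B's level loop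
theorem loopA_eq_loopB (T : List (String × List String)) (max_depth : Int) :
    ∀ (n : Nat) (d : Int) (front : List String) (v c : PySem.Set String) (f : Nat),
      (max_depth + 1 - d).toNat = n →
      phi T (front.map (fun s => (s, d))) v ≤ f →
      loopA T max_depth f (front.map (fun s => (s, d))) v c = loopB T n front v c := by
  intro n
  induction n with
  | zero =>
      intro d front v c f hn hf
      have hd : max_depth < d := by omega
      have hA : loopA T max_depth f (front.map (fun s => (s, d))) v c = c :=
        loopA_skip_all T max_depth _ f v c (by
          intro p hp
          rcases List.mem_map.mp hp with ⟨s, _, hs⟩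
          subst hs
          exact hd) hf
      rw [hA]
      cases front <;> simp [loopB]
  | succ m ih =>
      intro d front v c f hn hf
      have hd : d ≤ max_depth := by omega
      cases front with
      | nil => simp [loopA, loopB]
      | cons n0 front =>
          rw [loopB]
          have hlev := loopA_level T max_depth d hd (n0 :: front) [] v c f
            (phi T (((n0 :: front).foldl (stepB T) (v, c, [])).2.2.map (fun s => (s, d + 1)))
              ((n0 :: front).foldl (stepB T) (v, c, [])).1)
            (by simpa using hf) (by simp)
          simp only [List.nil_append] at hlev
          rw [show ((n0 :: front).map (fun s => (s, d))) ++ ([] : List String).map (fun s => (s, d + 1))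
                = (n0 :: front).map (fun s => (s, d)) by simp] at hlev
          rw [hlev]
          · exact ih (d + 1) _ _ _ _ (by omega) (le_refl _)
          · simp

theorem unvisitedLen_empty (T : List (String × List String)) :
    unvisitedLen T PySem.Set.empty = totLen T := by
  unfold unvisitedLen totLen
  simp [PySem.Set.contains, PySem.Set.empty]

-- ===== VERDICT (by name: the statement is the Claim_ definition above) =====
theorem searchComponents_spec : Claim_equal_searchComponents := by
  intro xi T max_depth _
  show searchComponents xi T max_depth = searchComponents_alt xi T max_depth
  unfold searchComponents searchComponents_alt
  have h0 : ([xi].map (fun s => (s, (0 : Int)))) = [(xi, (0 : Int))] := rfl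
  have hphi : phi T ([xi].map (fun s => (s, (0 : Int)))) PySem.Set.empty ≤ 1 + totLen T := by
    rw [h0]
    unfold phi
    rw [unvisitedLen_empty]
    simp
  have := loopA_eq_loopB T max_depth (max_depth + 1).toNat 0 [xi]
    PySem.Set.empty PySem.Set.empty (1 + totLen T) (by omega) hphi
  rw [h0] at this
  exact this
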